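-- pv_equiv track=rewrite | github.com/FSN648/Identifying-unique-vulnerabilities | app.py | group_vulnerabilities
-- ===== SOURCE A (Python) =====
-- def group_vulnerabilities(data):
--     grouped = {}
--     for item in data:
--         key = (item['endpoint'], item['cve'])
--         if key not in grouped:
--             grouped[key] = []
--         grouped[key].append(item)
--
--     result = []
--     group_id = 1
--     for key, vulnerabilities in grouped.items():
--         for vuln in vulnerabilities:
--             vuln['tag'] = f'group_{group_id}'
--         result.extend(vulnerabilities)
--         group_id += 1
--
--     return result
-- ===== SOURCE B (Python) =====
-- def group_vulnerabilities(data):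
--     # Alternative decomposition: first-seen key list, then one filtering pass per group.
--     seen = []
--     for item in data:
--         key = (item['endpoint'], item['cve'])
--         if key not in seen:
--             seen.append(key)
--     result = []
--     for gid, key in enumerate(seen, 1):
--         tag = f'group_{gid}'
--         for item in data:
--             if (item['endpoint'], item['cve']) == key:
--                 item['tag'] = tag
--                 result.append(item)
--     return result
-- ===== Notes on version B (the rewrite author's own statement) =====
-- stated objective: alternative
-- what changed: Replaces the dict-of-buckets (hash grouping, then concatenating buckets) with a first-seen key list plus one stable filtering pass over the data per group; no dict is built at all.
import Mathlib
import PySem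

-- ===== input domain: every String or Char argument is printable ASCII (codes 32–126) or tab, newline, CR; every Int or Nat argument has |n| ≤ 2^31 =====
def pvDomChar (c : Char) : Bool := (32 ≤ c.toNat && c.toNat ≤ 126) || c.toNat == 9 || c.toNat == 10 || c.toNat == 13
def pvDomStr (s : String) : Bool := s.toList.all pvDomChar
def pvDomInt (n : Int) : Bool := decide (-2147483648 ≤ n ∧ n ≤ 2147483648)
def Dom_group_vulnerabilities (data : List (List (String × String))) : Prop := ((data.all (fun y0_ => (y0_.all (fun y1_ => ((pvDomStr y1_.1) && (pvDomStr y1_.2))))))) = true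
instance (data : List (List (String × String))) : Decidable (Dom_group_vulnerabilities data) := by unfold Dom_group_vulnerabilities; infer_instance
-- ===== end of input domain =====

-- B groups by a first-seen key list plus a stable filtering pass per group instead of A's dict of buckets.
-- Both Pythons mutate the items in place (setting item['tag']); the equivalence proved here is about the return value.

-- key = (item['endpoint'], item['cve'])  (Pre_ guarantees both keys are present, so getD never supplies its default)
def pvKey (item : List (String × String)) : String × String :=
  ((PySem.Dict.mk item).getD "endpoint" "", (PySem.Dict.mk item).getD "cve" "")

-- item['tag'] = t  (dict assignment: overwrite in place, else append)
def pvSetTag (item : List (String × String)) (t : String) : List (String × String) :=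
  ((PySem.Dict.mk item).insert "tag" t).items

-- ===== PORT A =====
def group_vulnerabilities (data : List (List (String × String))) : List (List (String × String)) :=
  ((data.foldl (fun (g : PySem.Dict (String × String) (List (List (String × String)))) item =>
      let key := pvKey item
      let g := if g.contains key then g else g.insert key []
      g.modify key [] (fun v => v ++ [item])) PySem.Dict.empty).items.foldl
    (fun (st : List (List (String × String)) × Int) kv =>
      (st.1 ++ kv.2.map (fun vuln => pvSetTag vuln ("group_" ++ PySem.Int.toStr st.2)), st.2 + 1))
    ([], 1)).1

-- ===== PORT B =====
def group_vulnerabilities_alt (data : List (List (String × String))) : List (List (String × String)) :=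
  (PySem.List.enumerate
      (data.foldl (fun (s : PySem.Set (String × String)) item => PySem.Set.add s (pvKey item)) PySem.Set.empty) 1).foldl
    (fun result p =>
      data.foldl (fun result item =>
        if pvKey item == p.2 then result ++ [pvSetTag item ("group_" ++ PySem.Int.toStr p.1)] else result) result)
    []

-- ===== PRECONDITION & SPEC =====
-- Pre_: every item has the 'endpoint' and 'cve' keys; on any other input both Pythons raise KeyError.
def Pre_group_vulnerabilities (data : List (List (String × String))) : Prop :=
  ∀ item ∈ data, "endpoint" ∈ item.map Prod.fst ∧ "cve" ∈ item.map Prod.fst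
instance (data : List (List (String × String))) : Decidable (Pre_group_vulnerabilities data) := by
  unfold Pre_group_vulnerabilities; infer_instance

def pvWitness_group_vulnerabilities : (List (List (String × String))) :=
  [[("endpoint", "/a"), ("cve", "CVE-1"), ("sev", "high")],
   [("endpoint", "/a"), ("cve", "CVE-1")],
   [("endpoint", "/b"), ("cve", "CVE-2"), ("tag", "old")]]

def Spec_group_vulnerabilities (data : List (List (String × String))) (out : List (List (String × String))) : Prop := out = group_vulnerabilities_alt data
instance (data : List (List (String × String))) (out : List (List (String × String))) : Decidable (Spec_group_vulnerabilities data out) := by unfold Spec_group_vulnerabilities; infer_instance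

-- ===== CLAIM (what is proved, stated in full; the proofs are below) =====
def Claim_equal_group_vulnerabilities : Prop := ∀ (data : List (List (String × String))), Dom_group_vulnerabilities data → Pre_group_vulnerabilities data → Spec_group_vulnerabilities data (group_vulnerabilities data)

-- ===== LEMMAS AND PROOFS =====

-- the canonical bucket: all items of `data` whose key is k, in order
def pvBucket (data : List (List (String × String))) (k : String × String) :
    List (List (String × String)) :=
  data.filter (fun it => pvKey it == k)

-- the keys in first-seen order
def pvKeys (data : List (List (String × String))) : List (String × String) :=
  PySem.Set.ofList (data.map pvKey)

-- A's "ensure key, then append" step is exactly `modify key [] (· ++ [item])`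
theorem modify_skip_ensure {κ ν : Type} [BEq κ] [LawfulBEq κ]
    (g : PySem.Dict κ ν) (k : κ) (d0 : ν) (f : ν → ν) :
    (if g.contains k then g else g.insert k d0).modify k d0 f = g.modify k d0 f := by
  unfold PySem.Dict.modify
  split_ifs with h
  · rfl
  · have h2 : g.getD k d0 = d0 := PySem.Dict.getD_of_not_contains g d0 (by simpa using h)
    rw [PySem.Dict.insert_insert_self, PySem.Dict.getD_insert_self, h2]

def pvGrouped (data : List (List (String × String))) :
    PySem.Dict (String × String) (List (List (String × String))) :=
  data.foldl (fun g item => g.modify (pvKey item) [] (fun v => v ++ [item])) PySem.Dict.empty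

theorem grouped_eq (data : List (List (String × String))) :
    data.foldl (fun g item =>
      let key := pvKey item
      let g := if g.contains key then g else g.insert key []
      g.modify key [] (fun v => v ++ [item])) PySem.Dict.empty = pvGrouped data := by
  unfold pvGrouped
  exact PySem.List.foldl_congr_mem data _ _ _ (fun g item _ => modify_skip_ensure g (pvKey item) [] _)

theorem grouped_getD (data : List (List (String × String))) (k : String × String) :
    (pvGrouped data).getD k [] = pvBucket data k := by
  unfold pvGrouped pvBucket
  rw [show List.foldl (fun g item => g.modify (pvKey item) [] (fun v => v ++ [item]))
        (PySem.Dict.empty : PySem.Dict (String × String) (List (List (String × String)))) data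
      = List.foldl (fun g (p : (String × String) × List (String × String)) => g.modify p.1 [] (fun v => v ++ [p.2]))
        PySem.Dict.empty (data.map (fun it => (pvKey it, it)))
    from (List.foldl_map (f := fun it => (pvKey it, it))
      (g := fun g (p : (String × String) × List (String × String)) => g.modify p.1 [] (fun v => v ++ [p.2]))
      (l := data) (init := PySem.Dict.empty)).symm]
  rw [PySem.Dict.getD_foldl_modify_append]
  simp [List.filter_map, Function.comp_def]

theorem grouped_keys (data : List (List (String × String))) :
    (pvGrouped data).keys = pvKeys data := by
  unfold pvGrouped pvKeys
  rw [PySem.Dict.keys_foldl_modify_key]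
  simp [PySem.Set.update_nil_left, PySem.Dict.keys_empty]

theorem grouped_nodup (data : List (List (String × String))) :
    (pvGrouped data).keys.Nodup := by
  unfold pvGrouped
  exact PySem.Dict.nodup_keys_foldl_modify_key data pvKey []
    (fun d item => fun v => v ++ [item]) PySem.Dict.empty (by simp [PySem.Dict.keys_empty])

theorem grouped_items (data : List (List (String × String))) :
    (pvGrouped data).items = (pvKeys data).map (fun k => (k, pvBucket data k)) := by
  rw [PySem.Dict.items_eq_map_keys (pvGrouped data) (grouped_nodup data) [], grouped_keys]
  exact List.map_congr_left (fun k _ => by rw [grouped_getD])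

-- A's numbered concatenation over the bucket list equals B's enumerate fold
theorem main_fold (data : List (List (String × String))) (K : List (String × String)) :
    ∀ (acc : List (List (String × String))) (i : Int),
    ((K.map (fun k => (k, pvBucket data k))).foldl
      (fun (st : List (List (String × String)) × Int) kv =>
        (st.1 ++ kv.2.map (fun vuln => pvSetTag vuln ("group_" ++ PySem.Int.toStr st.2)), st.2 + 1))
      (acc, i)).1
    = (PySem.List.enumerate K i).foldl
        (fun result p => result ++ (pvBucket data p.2).map (fun v => pvSetTag v ("group_" ++ PySem.Int.toStr p.1))) acc := by
  induction K with
  | nil => intro acc i; simp [PySem.List.enumerate_nil]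
  | cons k K ih =>
    intro acc i
    rw [PySem.List.enumerate_cons]
    simp only [List.map_cons, List.foldl_cons]
    exact ih _ _

-- ===== VERDICT (by name: the statement is the Claim_ definition above) =====
theorem group_vulnerabilities_spec : Claim_equal_group_vulnerabilities := by
  intro data _ _
  unfold Spec_group_vulnerabilities group_vulnerabilities group_vulnerabilities_alt
  rw [grouped_eq, grouped_items, main_fold]
  rw [show data.foldl (fun s item => PySem.Set.add s (pvKey item)) PySem.Set.empty = pvKeys data by
    unfold pvKeys
    rw [← PySem.Set.update_map_eq_foldl_add]
    exact PySem.Set.update_nil_left _]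
  refine (PySem.List.foldl_congr_mem _ _ _ _ (fun result p _ => ?_)).symm
  simp only [pvBucket]
  exact PySem.List.foldl_append_if (fun it => pvKey it == p.2)
    (fun it => pvSetTag it ("group_" ++ PySem.Int.toStr p.1)) data result
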